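-- pv_equiv track=rewrite | github.com/ivanviragine/wade | src/wade/services/knowledge_service.py | _parse_tags_from_heading_rest
-- ===== SOURCE A (Python) =====
-- def _parse_tags_from_heading_rest(heading_rest: str) -> list[str]:
--     """Extract tags from the heading_rest field.
--
--     heading_rest examples:
--       "plan" → []
--       "plan | tags: git, worktree" → ["git", "worktree"]
--       "plan | tags: git, worktree | Issue #7" → ["git", "worktree"]
--     """
--     parts = [p.strip() for p in heading_rest.split("|")]
--     for part in parts:
--         if part.startswith("tags:"):
--             raw_tags = part[5:].strip()
--             if not raw_tags:
--                 return []
--             return [t.strip() for t in raw_tags.split(",") if t.strip()]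
--     return []
-- ===== SOURCE B (Python) =====
-- import re
--
-- _TAGS_RE = re.compile(r'(?:^|\|)\s*tags:([^|]*)')
--
--
-- def _parse_tags_from_heading_rest(heading_rest: str) -> list[str]:
--     """Extract tags from heading_rest with a single anchored regex search."""
--     m = _TAGS_RE.search(heading_rest)
--     if m is None:
--         return []
--     return [tag for tag in (t.strip() for t in m.group(1).split(',')) if tag]
-- ===== Notes on version B (the rewrite author's own statement) =====
-- stated objective: idiomatic
-- what changed: Replaces the split-on-pipe-then-iterate-and-strip loop with a single compiled regex search anchored at the string start or just after a pipe (the raw-tags-empty special case is absorbed by the comprehension's filter).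
import Mathlib
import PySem

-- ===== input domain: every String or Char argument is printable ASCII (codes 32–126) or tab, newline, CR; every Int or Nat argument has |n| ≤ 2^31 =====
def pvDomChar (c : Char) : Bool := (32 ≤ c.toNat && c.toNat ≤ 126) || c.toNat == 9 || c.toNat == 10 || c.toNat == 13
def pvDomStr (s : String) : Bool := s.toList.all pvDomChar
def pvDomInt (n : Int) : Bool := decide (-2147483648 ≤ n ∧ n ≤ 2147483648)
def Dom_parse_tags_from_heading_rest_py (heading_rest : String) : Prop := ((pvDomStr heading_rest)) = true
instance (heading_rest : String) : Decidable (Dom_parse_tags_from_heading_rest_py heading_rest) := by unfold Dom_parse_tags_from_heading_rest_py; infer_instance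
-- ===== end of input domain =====

-- B replaces A's split-on-pipe-and-iterate loop by a single anchored regex search (more idiomatic; same cost).

-- ===== PORT A =====
-- [t.strip() for t in raw_tags.split(",") if t.strip()]
def aParseTags (rawTags : List Char) : List String :=
  (((PySem.Chars.splitOn rawTags [',']).map PySem.Chars.strip).filter (fun t => t ≠ [])).map
    (fun t => String.ofList t)

-- the 'for part in parts' loop
def aLoop : List (List Char) → List String
  | [] => []
  | part :: parts =>
    if PySem.Chars.startswith part "tags:".toList then
      let rawTags := PySem.Chars.strip (PySem.List.slice part (some 5) none)
      if rawTags = [] then [] else aParseTags rawTags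
    else aLoop parts

def parse_tags_from_heading_rest_py (heading_rest : String) : List String :=
  aLoop ((PySem.Chars.splitOn heading_rest.toList ['|']).map PySem.Chars.strip)

-- ===== PORT B =====
-- Hand port of the regex search for r'(?:^|\|)\s*tags:([^|]*)' (exact for this anchored
-- pattern): a match can start only at position 0 (the '^' branch) or at a '|' (the '\|'
-- branch, consuming the pipe), so the leftmost-match search tries position 0 and then the
-- position just after each successive '|'.  At a candidate position, '\s*' is forced to be
-- maximal-munch (the next literal 't' is not whitespace), 'tags:' is a literal, and the
-- group '([^|]*)' captures greedily up to the next '|' or the end.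
def bSearch (s : List Char) : Option (List Char) :=
  -- t := the '\s*'-consumed position: lstrip s
  if PySem.Chars.startswith (PySem.Chars.lstrip s) "tags:".toList then
    some (((PySem.Chars.lstrip s).drop 5).takeWhile (· != '|'))
  else
    match h : s.dropWhile (· != '|') with
    | [] => none
    | _ :: rest => bSearch rest
termination_by s.length
decreasing_by
  have h1 := List.length_dropWhile_le (· != '|') s
  rw [h] at h1
  simp at h1
  omega

def parse_tags_from_heading_rest_py_alt (heading_rest : String) : List String :=
  match bSearch heading_rest.toList with
  | none => []
  | some grp =>
    (PySem.Chars.splitOn grp [',']).filterMap (fun t =>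
      let tag := PySem.Chars.strip t
      if tag = [] then none else some (String.ofList tag))

-- ===== PRECONDITION & SPEC =====
def Spec_parse_tags_from_heading_rest_py (heading_rest : String) (out : List String) : Prop := out = parse_tags_from_heading_rest_py_alt heading_rest
instance (heading_rest : String) (out : List String) : Decidable (Spec_parse_tags_from_heading_rest_py heading_rest out) := by unfold Spec_parse_tags_from_heading_rest_py; infer_instance

-- ===== CLAIM (what is proved, stated in full; the proofs are below) =====
def Claim_equal_parse_tags_from_heading_rest_py : Prop := ∀ (heading_rest : String), Dom_parse_tags_from_heading_rest_py heading_rest → Spec_parse_tags_from_heading_rest_py heading_rest (parse_tags_from_heading_rest_py heading_rest)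

-- ===== LEMMAS AND PROOFS =====

-- Reference single-character splitter: s.split(c) as a structural recursion.
def splitCh (c : Char) : List Char → List (List Char)
  | [] => [[]]
  | a :: x => if a = c then [] :: splitCh c x else List.modifyHead (a :: ·) (splitCh c x)

lemma splitCh_ne_nil (c : Char) (x : List Char) : splitCh c x ≠ [] := by
  cases x with
  | nil => simp [splitCh]
  | cons a x =>
    simp only [splitCh]
    split
    · simp
    · cases h : splitCh c x with
      | nil => exact absurd h (splitCh_ne_nil c x)
      | cons y ys => simp [h]

lemma splitOn_go_eq (c : Char) (l : List Char) : ∀ (fuel : Nat) (cur : List Char) (acc : List (List Char)), l.length < fuel →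
    PySem.Chars.splitOn.go [c] fuel l cur acc
      = acc.reverse ++ List.modifyHead (fun h => cur.reverse ++ h) (splitCh c l) := by
  induction l with
  | nil =>
    intro fuel cur acc hf
    match fuel with
    | f + 1 =>
      simp [PySem.Chars.splitOn.go, splitCh]
  | cons a l ih =>
    intro fuel cur acc hf
    match fuel with
    | f + 1 =>
      have hf' : l.length < f := by simpa using hf
      by_cases hac : a = c
      · subst hac
        have hpre : [a].isPrefixOf (a :: l) = true := by simp [List.isPrefixOf]
        rw [PySem.Chars.splitOn.go]
        simp only [hpre, if_pos]
        rw [show [a].length = 1 from rfl]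
        simp only [List.drop_succ_cons, List.drop_zero]
        rw [ih f [] (cur.reverse :: acc) hf']
        simp [splitCh]
        cases splitCh a l <;> rfl
      · have hpre : [c].isPrefixOf (a :: l) = false := by
          simp [List.isPrefixOf]
          exact fun h => absurd h.symm hac
        rw [PySem.Chars.splitOn.go]
        simp only [hpre, Bool.false_eq_true, if_neg, not_false_iff]
        rw [ih f (a :: cur) acc hf']
        simp only [splitCh, if_neg hac, List.modifyHead_modifyHead]
        congr 1
        apply congrArg (fun f => List.modifyHead f (splitCh c l))
        funext h
        simp

lemma splitOn_eq_splitCh (c : Char) (s : List Char) : PySem.Chars.splitOn s [c] = splitCh c s := by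
  unfold PySem.Chars.splitOn
  rw [splitOn_go_eq c s (s.length + 1) [] [] (by omega)]
  simp
  cases splitCh c s <;> rfl

lemma splitCh_head (c : Char) (s : List Char) : ∃ T, splitCh c s = s.takeWhile (· != c) :: T := by
  induction s with
  | nil => exact ⟨[], rfl⟩
  | cons a s ih =>
    by_cases hac : a = c
    · subst hac
      exact ⟨splitCh a s, by simp [splitCh, List.takeWhile_cons]⟩
    · obtain ⟨T, hT⟩ := ih
      refine ⟨T, ?_⟩
      simp [splitCh, hac, hT, List.takeWhile_cons, bne_iff_ne]

lemma splitCh_no_sep (c : Char) (s : List Char) (h : s.dropWhile (· != c) = []) :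
    splitCh c s = [s] := by
  induction s with
  | nil => rfl
  | cons a s ih =>
    rw [List.dropWhile_cons] at h
    by_cases hac : a = c
    · simp [hac] at h
    · simp only [bne_iff_ne, ne_eq, hac, not_false_iff, if_pos] at h
      simp [splitCh, hac, ih h]

lemma splitCh_sep (c : Char) (s : List Char) (a : Char) (r : List Char)
    (h : s.dropWhile (· != c) = a :: r) :
    splitCh c s = s.takeWhile (· != c) :: splitCh c r := by
  induction s with
  | nil => simp at h
  | cons b s ih =>
    rw [List.dropWhile_cons] at h
    by_cases hbc : b = c
    · simp only [bne_self_eq_false, Bool.false_eq_true, if_neg, not_false_iff, hbc] at h ⊢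
      obtain ⟨rfl, rfl⟩ : a = c ∧ r = s := by
        constructor <;> · injection h with h1 h2; simp_all
      simp [splitCh, List.takeWhile_cons]
    · simp only [bne_iff_ne, ne_eq, hbc, not_false_iff, if_pos] at h
      simp [splitCh, hbc, ih h, List.takeWhile_cons, bne_iff_ne]

lemma splitCh_eq_singleton (c : Char) (u s : List Char) (h : splitCh c u = [s]) : s = u := by
  induction u generalizing s with
  | nil => simp [splitCh] at h; simp [h]
  | cons a u ih =>
    by_cases hac : a = c
    · subst hac
      simp only [splitCh, if_pos rfl] at h
      injection h with h1 h2
      exact absurd h2 (splitCh_ne_nil a u)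
    · simp only [splitCh, if_neg hac] at h
      cases hS : splitCh c u with
      | nil => exact absurd hS (splitCh_ne_nil c u)
      | cons y ys =>
        rw [hS] at h
        simp only [List.modifyHead_cons] at h
        injection h with h1 h2
        subst h2
        rw [← h1, ih y hS]

-- whitespace facts
lemma rstrip_nil_iff (u : List Char) :
    PySem.Chars.rstrip u = [] ↔ ∀ a ∈ u, PySem.Chars.isspace a = true := by
  simp [PySem.Chars.rstrip, List.dropWhile_eq_nil_iff]

lemma lstrip_nil_iff (u : List Char) :
    PySem.Chars.lstrip u = [] ↔ ∀ a ∈ u, PySem.Chars.isspace a = true := by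
  simp [PySem.Chars.lstrip, List.dropWhile_eq_nil_iff]

lemma rstrip_cons (a : Char) (u : List Char) :
    PySem.Chars.rstrip (a :: u)
      = if PySem.Chars.rstrip u = [] then (if PySem.Chars.isspace a then [] else [a])
        else a :: PySem.Chars.rstrip u := by
  simp only [PySem.Chars.rstrip, List.reverse_cons, List.dropWhile_append]
  by_cases h0 : List.dropWhile PySem.Chars.isspace u.reverse = []
  · simp only [h0, List.isEmpty_nil, if_pos, List.reverse_eq_nil_iff]
    by_cases ha : PySem.Chars.isspace a
    · simp [List.dropWhile, ha, h0]
    · simp [List.dropWhile, ha, h0]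
  · have : (List.dropWhile PySem.Chars.isspace u.reverse).isEmpty = false := by
      simpa [List.isEmpty_iff] using h0
    simp [this, h0]

lemma lstrip_rstrip_comm (u : List Char) :
    PySem.Chars.lstrip (PySem.Chars.rstrip u) = PySem.Chars.rstrip (PySem.Chars.lstrip u) := by
  induction u with
  | nil => rfl
  | cons a u ih =>
    rw [rstrip_cons]
    by_cases h0 : PySem.Chars.rstrip u = []
    · have hall : ∀ b ∈ u, PySem.Chars.isspace b = true := (rstrip_nil_iff u).mp h0
      have hl0 : PySem.Chars.lstrip u = [] := (lstrip_nil_iff u).mpr hall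
      by_cases ha : PySem.Chars.isspace a
      · simp only [h0, if_pos, ha, if_pos]
        have : PySem.Chars.lstrip (a :: u) = PySem.Chars.lstrip u := by
          simp [PySem.Chars.lstrip, List.dropWhile_cons, ha]
        rw [this, hl0]
        rfl
      · simp only [h0, if_pos, ha, Bool.false_eq_true, if_neg, not_false_iff]
        have hl : PySem.Chars.lstrip (a :: u) = a :: u := by
          simp [PySem.Chars.lstrip, List.dropWhile_cons, ha]
        rw [hl, rstrip_cons, if_pos h0, if_neg (by simp [ha])]
        simp [PySem.Chars.lstrip, List.dropWhile_cons, ha]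
    · rw [if_neg h0]
      by_cases ha : PySem.Chars.isspace a
      · have hl : PySem.Chars.lstrip (a :: u) = PySem.Chars.lstrip u := by
          simp [PySem.Chars.lstrip, List.dropWhile_cons, ha]
        have hl2 : PySem.Chars.lstrip (a :: PySem.Chars.rstrip u) = PySem.Chars.lstrip (PySem.Chars.rstrip u) := by
          simp [PySem.Chars.lstrip, List.dropWhile_cons, ha]
        rw [hl, hl2, ih]
      · have hl : PySem.Chars.lstrip (a :: u) = a :: u := by
          simp [PySem.Chars.lstrip, List.dropWhile_cons, ha]
        have hl2 : PySem.Chars.lstrip (a :: PySem.Chars.rstrip u) = a :: PySem.Chars.rstrip u := by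
          simp [PySem.Chars.lstrip, List.dropWhile_cons, ha]
        rw [hl, hl2, rstrip_cons, if_neg h0]

lemma rstrip_idem (u : List Char) :
    PySem.Chars.rstrip (PySem.Chars.rstrip u) = PySem.Chars.rstrip u := by
  simp [PySem.Chars.rstrip, List.reverse_reverse, List.dropWhile_idempotent]

lemma strip_rstrip (u : List Char) :
    PySem.Chars.strip (PySem.Chars.rstrip u) = PySem.Chars.strip u := by
  unfold PySem.Chars.strip
  rw [lstrip_rstrip_comm, rstrip_idem]

lemma strip_lstrip (u : List Char) :
    PySem.Chars.strip (PySem.Chars.lstrip u) = PySem.Chars.strip u := by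
  unfold PySem.Chars.strip PySem.Chars.lstrip
  rw [List.dropWhile_idempotent]

lemma rstrip_prefix (u : List Char) : PySem.Chars.rstrip u <+: u := by
  have h := List.dropWhile_suffix (l := u.reverse) PySem.Chars.isspace
  have := List.reverse_prefix.mpr h
  simpa [PySem.Chars.rstrip] using this

-- "tags:"-specific facts
lemma tags_rstrip (v : List Char) :
    PySem.Chars.rstrip ("tags:".toList ++ v) = "tags:".toList ++ PySem.Chars.rstrip v := by
  simp only [PySem.Chars.rstrip, List.reverse_append, List.dropWhile_append]
  have ht : List.dropWhile PySem.Chars.isspace ("tags:".toList).reverse = ("tags:".toList).reverse := by decide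
  by_cases h0 : List.dropWhile PySem.Chars.isspace v.reverse = []
  · simp [h0, ht]
    decide
  · have : (List.dropWhile PySem.Chars.isspace v.reverse).isEmpty = false := by
      simpa [List.isEmpty_iff] using h0
    simp [this, ht]

lemma tags_takeWhile (v : List Char) :
    ("tags:".toList ++ v).takeWhile (· != '|') = "tags:".toList ++ v.takeWhile (· != '|') := by
  have h : "tags:".toList = ['t', 'a', 'g', 's', ':'] := rfl
  rw [h]
  simp [List.takeWhile_cons]

lemma lstrip_takeWhile (c : Char) (hc : PySem.Chars.isspace c = false) (s : List Char) :
    PySem.Chars.lstrip (s.takeWhile (· != c)) = (PySem.Chars.lstrip s).takeWhile (· != c) := by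
  induction s with
  | nil => rfl
  | cons a s ih =>
    by_cases ha : PySem.Chars.isspace a
    · have hac : (a != c) = true := by
        simp only [bne_iff_ne, ne_eq]
        rintro rfl
        rw [ha] at hc
        exact absurd hc (by simp)
      simp only [List.takeWhile_cons, hac, if_pos]
      have h1 : PySem.Chars.lstrip (a :: List.takeWhile (· != c) s) = PySem.Chars.lstrip (List.takeWhile (· != c) s) := by
        simp [PySem.Chars.lstrip, List.dropWhile_cons, ha]
      have h2 : PySem.Chars.lstrip (a :: s) = PySem.Chars.lstrip s := by
        simp [PySem.Chars.lstrip, List.dropWhile_cons, ha]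
      rw [h1, h2, ih]
    · have h2 : PySem.Chars.lstrip (a :: s) = a :: s := by
        simp [PySem.Chars.lstrip, List.dropWhile_cons, ha]
      rw [h2]
      by_cases hac : (a != c) = true
      · simp only [List.takeWhile_cons, hac, if_pos]
        simp [PySem.Chars.lstrip, List.dropWhile_cons, ha]
      · simp only [List.takeWhile_cons, hac]
        simp only [Bool.not_eq_true] at hac
        simp [hac, PySem.Chars.lstrip]

lemma cond_eq (s : List Char) :
    PySem.Chars.startswith (PySem.Chars.strip (s.takeWhile (· != '|'))) "tags:".toList
      = PySem.Chars.startswith (PySem.Chars.lstrip s) "tags:".toList := by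
  rw [show ∀ a b : Bool, a = b ↔ (a = true ↔ b = true) from by decide]
  simp only [PySem.Chars.startswith_iff]
  unfold PySem.Chars.strip
  rw [lstrip_takeWhile '|' (by decide)]
  constructor
  · intro h
    have h1 : "tags:".toList <+: (PySem.Chars.lstrip s).takeWhile (· != '|') :=
      h.trans (rstrip_prefix _)
    exact h1.trans (List.takeWhile_prefix _)
  · rintro ⟨v, hv⟩
    rw [← hv, tags_takeWhile, tags_rstrip]
    exact List.prefix_append _ _

-- splitting vs stripping
lemma modifyHead_congr {α : Type} (f g : α → α) (L : List α) (h : ∀ x, f x = g x) :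
    List.modifyHead f L = List.modifyHead g L := by
  cases L <;> simp [h]

lemma splitCh_lstrip (c : Char) (hc : PySem.Chars.isspace c = false) (u : List Char) :
    splitCh c (PySem.Chars.lstrip u) = List.modifyHead PySem.Chars.lstrip (splitCh c u) := by
  induction u with
  | nil => rfl
  | cons a u ih =>
    by_cases ha : PySem.Chars.isspace a
    · have hac : a ≠ c := by rintro rfl; rw [ha] at hc; exact absurd hc (by simp)
      have h1 : PySem.Chars.lstrip (a :: u) = PySem.Chars.lstrip u := by
        simp [PySem.Chars.lstrip, List.dropWhile_cons, ha]
      rw [h1, ih]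
      simp only [splitCh, if_neg hac, List.modifyHead_modifyHead]
      apply modifyHead_congr
      intro x
      simp [Function.comp, PySem.Chars.lstrip, List.dropWhile_cons, ha]
    · have h1 : PySem.Chars.lstrip (a :: u) = a :: u := by
        simp [PySem.Chars.lstrip, List.dropWhile_cons, ha]
      rw [h1]
      by_cases hac : a = c
      · subst hac
        simp only [splitCh, if_pos rfl, List.modifyHead_cons]
        rfl
      · simp only [splitCh, if_neg hac, List.modifyHead_modifyHead]
        symm
        apply modifyHead_congr
        intro x
        simp [Function.comp, PySem.Chars.lstrip, List.dropWhile_cons, ha]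

-- last-element modifier (structural; Mathlib's modifyLast is array-based and opaque to induction)
def modLast (f : List Char → List Char) : List (List Char) → List (List Char)
  | [] => []
  | [x] => [f x]
  | x :: y :: xs => x :: modLast f (y :: xs)

lemma splitCh_rstrip (c : Char) (hc : PySem.Chars.isspace c = false) (u : List Char) :
    splitCh c (PySem.Chars.rstrip u) = modLast PySem.Chars.rstrip (splitCh c u) := by
  induction u with
  | nil => rfl
  | cons a u ih =>
    rw [rstrip_cons]
    by_cases h0 : PySem.Chars.rstrip u = []
    · rw [if_pos h0]
      have hall : ∀ b ∈ u, PySem.Chars.isspace b = true := (rstrip_nil_iff u).mp h0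
      have hnc : u.dropWhile (· != c) = [] := by
        rw [List.dropWhile_eq_nil_iff]
        intro x hx
        simp only [bne_iff_ne, ne_eq, decide_eq_true_eq]
        rintro rfl
        rw [hall x hx] at hc
        exact absurd hc (by simp)
      have hS : splitCh c u = [u] := splitCh_no_sep c u hnc
      by_cases ha : PySem.Chars.isspace a
      · have hac : a ≠ c := by rintro rfl; rw [ha] at hc; exact absurd hc (by simp)
        rw [if_pos ha]
        simp only [splitCh, if_neg hac, hS, List.modifyHead_cons, modLast]
        rw [rstrip_cons, if_pos h0, if_pos ha]
      · rw [if_neg ha]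
        by_cases hac : a = c
        · subst hac
          have hR : splitCh a (a :: u) = [[], u] := by
            rw [show splitCh a (a :: u) = [] :: splitCh a u from by simp [splitCh], hS]
          rw [hR]
          simp [modLast, h0, splitCh]
        · simp only [splitCh, if_neg hac, hS, List.modifyHead_cons, modLast]
          rw [rstrip_cons, if_pos h0, if_neg ha]
    · rw [if_neg h0]
      by_cases hac : a = c
      · subst hac
        simp only [splitCh, if_pos rfl, ih]
        cases hS : splitCh a u with
        | nil => exact absurd hS (splitCh_ne_nil a u)
        | cons y ys =>
          cases ys with
          | nil => simp [modLast]
          | cons z zs => simp [modLast]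
      · simp only [splitCh, if_neg hac, ih]
        cases hS : splitCh c u with
        | nil => exact absurd hS (splitCh_ne_nil c u)
        | cons y ys =>
          cases ys with
          | nil =>
            have hyu : y = u := splitCh_eq_singleton c u y hS
            subst hyu
            simp only [modLast, List.modifyHead_cons]
            rw [rstrip_cons, if_neg h0]
          | cons z zs => simp [modLast]

lemma map_strip_modifyHead (L : List (List Char)) :
    (List.modifyHead PySem.Chars.lstrip L).map PySem.Chars.strip = L.map PySem.Chars.strip := by
  cases L with
  | nil => rfl
  | cons x xs => simp [strip_lstrip]

lemma map_strip_modLast (L : List (List Char)) :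
    (modLast PySem.Chars.rstrip L).map PySem.Chars.strip = L.map PySem.Chars.strip := by
  match L with
  | [] => rfl
  | [x] => simp [modLast, strip_rstrip]
  | x :: y :: xs =>
    simp only [modLast, List.map_cons]
    rw [show ((modLast PySem.Chars.rstrip (y :: xs)).map PySem.Chars.strip) = (y :: xs).map PySem.Chars.strip from map_strip_modLast (y :: xs)]
    simp

-- stripped-and-filtered comma tokens
def stripTokens (u : List Char) : List (List Char) :=
  ((splitCh ',' u).map PySem.Chars.strip).filter (fun t => t ≠ [])

lemma stripTokens_strip (u : List Char) :
    stripTokens (PySem.Chars.strip u) = stripTokens u := by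
  unfold stripTokens
  rw [show PySem.Chars.strip u = PySem.Chars.rstrip (PySem.Chars.lstrip u) from rfl]
  rw [splitCh_rstrip ',' (by decide), map_strip_modLast]
  rw [splitCh_lstrip ',' (by decide), map_strip_modifyHead]

lemma filterMap_eq_stripTokens (L : List (List Char)) :
    L.filterMap (fun t =>
        let tag := PySem.Chars.strip t
        if tag = [] then none else some (String.ofList tag))
      = ((L.map PySem.Chars.strip).filter (fun t => t ≠ [])).map (fun t => String.ofList t) := by
  induction L with
  | nil => rfl
  | cons t L ih =>
    simp only [List.filterMap_cons, List.map_cons, List.filter_cons]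
    by_cases h : PySem.Chars.strip t = []
    · simp [h, ih]
    · simp [h, ih]

lemma main_eq : ∀ (n : Nat) (s : List Char), s.length ≤ n →
    aLoop ((splitCh '|' s).map PySem.Chars.strip)
      = (match bSearch s with
         | none => []
         | some grp =>
           (splitCh ',' grp).filterMap (fun t =>
             let tag := PySem.Chars.strip t
             if tag = [] then none else some (String.ofList tag))) := by
  intro n
  induction n with
  | zero =>
    intro s hs
    have hs0 : s = [] := by cases s with | nil => rfl | cons a s => simp at hs
    subst hs0
    have hB : bSearch [] = none := by
      rw [bSearch]
      rfl
    rw [hB]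
    rfl
  | succ n ih =>
    intro s hs
    by_cases cond : PySem.Chars.startswith (PySem.Chars.lstrip s) "tags:".toList = true
    · -- the regex matches here; A's loop accepts the first segment for the same reason
      have hB : bSearch s = some (((PySem.Chars.lstrip s).drop 5).takeWhile (· != '|')) := by
        rw [bSearch, if_pos cond]
      rw [hB]
      obtain ⟨T, hT⟩ := splitCh_head '|' s
      rw [hT]
      obtain ⟨v, hv⟩ := (PySem.Chars.startswith_iff _ _).mp cond
      have hseg : PySem.Chars.lstrip (s.takeWhile (· != '|'))
          = "tags:".toList ++ v.takeWhile (· != '|') := by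
        rw [lstrip_takeWhile '|' (by decide), ← hv, tags_takeWhile]
      have hstrip : PySem.Chars.strip (s.takeWhile (· != '|'))
          = "tags:".toList ++ PySem.Chars.rstrip (v.takeWhile (· != '|')) := by
        rw [show PySem.Chars.strip (s.takeWhile (· != '|'))
              = PySem.Chars.rstrip (PySem.Chars.lstrip (s.takeWhile (· != '|'))) from rfl,
           hseg, tags_rstrip]
      have cond' : PySem.Chars.startswith (PySem.Chars.strip (s.takeWhile (· != '|')))
          "tags:".toList = true := by
        rw [cond_eq]; exact cond
      have hcap : ((PySem.Chars.lstrip s).drop 5).takeWhile (· != '|') = v.takeWhile (· != '|') := by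
        rw [← hv, show ("tags:".toList ++ v).drop 5 = v from by
          rw [show (5 : Nat) = ("tags:".toList).length from rfl, List.drop_left]]
      rw [hcap]
      simp only [List.map_cons, aLoop, cond', if_pos]
      have hraw : PySem.Chars.strip
          (PySem.List.slice (PySem.Chars.strip (s.takeWhile (· != '|'))) (some 5) none)
          = PySem.Chars.strip (v.takeWhile (· != '|')) := by
        rw [PySem.List.slice_from _ (by norm_num), hstrip]
        rw [show Int.toNat 5 = ("tags:".toList).length from rfl, List.drop_left]
        exact strip_rstrip _
      rw [hraw, filterMap_eq_stripTokens]
      have hst : ((splitCh ',' (v.takeWhile (· != '|'))).map PySem.Chars.strip).filter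
            (fun t => t ≠ [])
          = stripTokens (PySem.Chars.strip (v.takeWhile (· != '|'))) := by
        rw [stripTokens_strip]
        rfl
      rw [hst]
      by_cases h0 : PySem.Chars.strip (v.takeWhile (· != '|')) = []
      · rw [if_pos h0, h0]
        rfl
      · rw [if_neg h0]
        unfold aParseTags
        rw [splitOn_eq_splitCh]
        rfl
    · have hcond : PySem.Chars.startswith (PySem.Chars.lstrip s) "tags:".toList = false := by
        simpa using cond
      cases hd : s.dropWhile (· != '|') with
      | nil =>
        have hB : bSearch s = none := by
          rw [bSearch, if_neg (by rw [hcond]; simp)]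
          split
          · rfl
          · next a r heq => simp [hd] at heq
        rw [hB]
        have hts : s.takeWhile (· != '|') = s := by
          have h1 := List.takeWhile_append_dropWhile (p := (· != '|')) (l := s)
          rw [hd, List.append_nil] at h1
          exact h1
        have cond'' : PySem.Chars.startswith (PySem.Chars.strip s) "tags:".toList = false := by
          rw [← hts, cond_eq]
          exact hcond
        rw [splitCh_no_sep '|' s hd]
        have cond2 : PySem.Chars.startswith (PySem.Chars.strip s) ['t','a','g','s',':'] = false := cond''
        simp [aLoop, cond2]
      | cons a r =>
        have hB : bSearch s = bSearch r := by
          rw [bSearch, if_neg (by rw [hcond]; simp)]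
          split
          · next heq => simp [hd] at heq
          · next a' r' heq =>
            rw [hd] at heq
            injection heq with h1 h2
            rw [h2]
        rw [hB]
        have cond' : PySem.Chars.startswith (PySem.Chars.strip (s.takeWhile (· != '|')))
            "tags:".toList = false := by
          rw [cond_eq]
          exact hcond
        rw [splitCh_sep '|' s a r hd]
        simp only [List.map_cons, aLoop]
        rw [if_neg (by rw [cond']; simp)]
        have hlen : r.length ≤ n := by
          have h1 := List.length_dropWhile_le (· != '|') s
          rw [hd] at h1
          simp only [List.length_cons] at h1
          omega
        exact ih r hlen

-- ===== VERDICT (by name: the statement is the Claim_ definition above) =====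
theorem parse_tags_from_heading_rest_py_spec : Claim_equal_parse_tags_from_heading_rest_py := by
  intro hr _
  unfold Spec_parse_tags_from_heading_rest_py
  unfold parse_tags_from_heading_rest_py parse_tags_from_heading_rest_py_alt
  rw [splitOn_eq_splitCh]
  have h := main_eq hr.toList.length hr.toList le_rfl
  rw [h]
  cases hb : bSearch hr.toList with
  | none => rfl
  | some grp => simp only [splitOn_eq_splitCh]
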